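-- pv_equiv track=rewrite | github.com/mishuang2017/mi | drgn/lib.py | ipv4
-- ===== SOURCE A (Python) =====
-- def ipv4(addr):
--     ip = ""
--     for i in range(4):
--         v = (addr >> (3 - i) * 8) & 0xff
--         ip += str(v)
--         if i < 3:
--             ip += "."
--     return ip
-- ===== SOURCE B (Python) =====
-- def ipv4(addr):
--     parts = []
--     for _ in range(4):
--         parts.append(addr % 256)
--         addr //= 256
--     return ".".join(str(b) for b in reversed(parts))
-- ===== Notes on version B (the rewrite author's own statement) =====
-- stated objective: alternative
-- what changed: B extracts the four bytes LSB-first by repeated floor-division and modulo with the byte base into a list, then reverses it and joins with dots, instead of A's MSB-first indexed shift-and-mask with manual string concatenation.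
import Mathlib
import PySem

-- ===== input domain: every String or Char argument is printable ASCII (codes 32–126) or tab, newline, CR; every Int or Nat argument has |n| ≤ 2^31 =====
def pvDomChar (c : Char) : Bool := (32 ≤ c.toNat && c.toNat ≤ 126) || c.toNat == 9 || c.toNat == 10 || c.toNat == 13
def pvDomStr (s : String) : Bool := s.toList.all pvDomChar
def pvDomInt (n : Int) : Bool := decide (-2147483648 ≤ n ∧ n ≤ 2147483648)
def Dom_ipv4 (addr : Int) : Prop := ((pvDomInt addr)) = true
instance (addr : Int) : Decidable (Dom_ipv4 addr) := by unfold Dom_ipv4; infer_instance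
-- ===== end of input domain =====

-- B extracts the four bytes LSB-first by repeated division/modulo by 256 and joins
-- the reversed list with '.', instead of A's MSB-first shift-and-mask concatenation.

-- ===== PORT A =====
-- ip += str(v) is ported as concatenation on List Char, materialised by String.ofList at the end.
def ipv4 (addr : Int) : String :=
  let ip : List Char := []
  let ip := (PySem.List.pyRange 0 4 1).foldl (fun ip i =>
    let v := PySem.Int.band (addr >>> ((3 - i) * 8).toNat) 255
    let ip := ip ++ PySem.Int.toChars v
    if i < 3 then ip ++ ['.'] else ip) ip
  String.ofList ip

-- ===== PORT B =====
def ipv4_alt (addr : Int) : String :=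
  let st := (PySem.List.pyRange 0 4 1).foldl (fun (st : Int × List Int) _ =>
    (PySem.Int.floordiv st.1 256, st.2 ++ [PySem.Int.mod st.1 256])) (addr, ([] : List Int))
  PySem.Str.join "." (st.2.reverse.map PySem.Int.toStr)

-- ===== PRECONDITION & SPEC =====
def Spec_ipv4 (addr : Int) (out : String) : Prop := out = ipv4_alt addr
instance (addr : Int) (out : String) : Decidable (Spec_ipv4 addr out) := by unfold Spec_ipv4; infer_instance

-- ===== CLAIM (what is proved, stated in full; the proofs are below) =====
def Claim_equal_ipv4 : Prop := ∀ (addr : Int), Dom_ipv4 addr → Spec_ipv4 addr (ipv4 addr)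

-- ===== LEMMAS AND PROOFS =====

-- Python's `a & 0xff` (for every sign of a) is `a emod 256`.
lemma band255 (a : Int) : PySem.Int.band a 255 = a % 256 := by
  unfold PySem.Int.band
  split_ifs with h1 h2 h3
  · rw [show (255:Int).toNat = 2^8-1 from rfl, Nat.and_two_pow_sub_one_eq_mod]
    norm_num; omega
  · exact absurd (by norm_num) h2
  · rw [show (255:Int).toNat = 2^8-1 from rfl, Nat.and_comm, Nat.and_two_pow_sub_one_eq_mod]
    norm_num; omega
  · exact absurd (by norm_num) h3

-- A's shift-then-mask byte is a floor-division byte.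
lemma byte_eq (a : Int) (n : Nat) : PySem.Int.band (a >>> n) 255 = (a / 2^n) % 256 := by
  rw [band255, Int.shiftRight_eq_div_pow]; push_cast; ring_nf

lemma fd256 (a : Int) : PySem.Int.floordiv a 256 = a / 256 :=
  PySem.Int.floordiv_eq_ediv_of_pos (by norm_num)

lemma md256 (a : Int) : PySem.Int.mod a 256 = a % 256 :=
  PySem.Int.mod_eq_emod_of_pos (by norm_num)

lemma pyRange04 : PySem.List.pyRange 0 4 1 = [0, 1, 2, 3] := by decide

-- ===== VERDICT (by name: the statement is the Claim_ definition above) =====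
theorem ipv4_spec : Claim_equal_ipv4 := by
  intro addr _
  unfold Spec_ipv4 ipv4 ipv4_alt
  rw [pyRange04]
  have e2 : addr / 256 / 256 = addr / 65536 := by
    rw [Int.ediv_ediv_of_nonneg (by norm_num)]; norm_num
  have e3 : addr / 65536 / 256 = addr / 16777216 := by
    rw [Int.ediv_ediv_of_nonneg (by norm_num)]; norm_num
  have h24 : PySem.Int.band (addr >>> (((((3:Int) - 0) * 8).toNat : Nat) : Int)) 255 = addr / 16777216 % 256 := by
    rw [Int.shiftRight_natCast_right, show (((3:Int) - 0) * 8).toNat = 24 from by decide, byte_eq]; norm_num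
  have h16 : PySem.Int.band (addr >>> (((((3:Int) - 1) * 8).toNat : Nat) : Int)) 255 = addr / 65536 % 256 := by
    rw [Int.shiftRight_natCast_right, show (((3:Int) - 1) * 8).toNat = 16 from by decide, byte_eq]; norm_num
  have h8 : PySem.Int.band (addr >>> (((((3:Int) - 2) * 8).toNat : Nat) : Int)) 255 = addr / 256 % 256 := by
    rw [Int.shiftRight_natCast_right, show (((3:Int) - 2) * 8).toNat = 8 from by decide, byte_eq]; norm_num
  have h0 : PySem.Int.band (addr >>> (((((3:Int) - 3) * 8).toNat : Nat) : Int)) 255 = addr % 256 := by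
    rw [Int.shiftRight_natCast_right, show (((3:Int) - 3) * 8).toNat = 0 from by decide, byte_eq]; norm_num
  simp only [List.foldl, PySem.Str.join]
  rw [h24, h16, h8, h0]
  refine congrArg String.ofList ?_
  rw [show ("." : String).toList = ['.'] from rfl]
  norm_num [fd256, md256, e2, e3, List.append_assoc,
    PySem.Chars.join, List.intercalate, PySem.Int.toList_toStr]
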